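-- pv_equiv track=rewrite | github.com/stefanodangelo/grover-orquestra | modules/functions.py | find_all_mcz
-- ===== SOURCE A (Python) =====
-- def find_all_mcz(metadata):
--     mcz_positions = []
--     mct_in_oracle = True # boolean telling whether the mct is in the oracle or not
--     for i in range(len(metadata['gates'])):
--         if (metadata['gates'][i]['name'] == 'MCT' or metadata['gates'][i]['name'] == 'CNOT' or metadata['gates'][i]['name'] == 'CCX'):
--             if mct_in_oracle:
--                 mcz_positions.append(i)
--                 mct_in_oracle = False
--             else:
--                 mct_in_oracle = True
--
--     mcz_positions.sort(reverse=True) # sort in order not to affect the positions of the gates to remove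
--
--     return mcz_positions
-- ===== SOURCE B (Python) =====
-- def find_all_mcz(metadata):
--     wanted = ('MCT', 'CNOT', 'CCX')
--     names = [gate['name'] in wanted for gate in metadata['gates']]
--     total = sum(names)
--     out = []
--     seen = 0
--     for i in range(len(names) - 1, -1, -1):
--         if names[i]:
--             seen += 1
--             if (total - seen) % 2 == 0:
--                 out.append(i)
--     return out
-- ===== Notes on version B (the rewrite author's own statement) =====
-- stated objective: alternative
-- what changed: Replaces the forward toggle-flag loop plus final reverse sort by a two-stage count-and-backward-scan: first a boolean match mask and the total match count are computed, then a single backward pass keeps index i exactly when the count of matches at or after i gives it an even forward rank, emitting the result directly in descending order with no toggle, no reverse and no sort.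
import Mathlib
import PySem

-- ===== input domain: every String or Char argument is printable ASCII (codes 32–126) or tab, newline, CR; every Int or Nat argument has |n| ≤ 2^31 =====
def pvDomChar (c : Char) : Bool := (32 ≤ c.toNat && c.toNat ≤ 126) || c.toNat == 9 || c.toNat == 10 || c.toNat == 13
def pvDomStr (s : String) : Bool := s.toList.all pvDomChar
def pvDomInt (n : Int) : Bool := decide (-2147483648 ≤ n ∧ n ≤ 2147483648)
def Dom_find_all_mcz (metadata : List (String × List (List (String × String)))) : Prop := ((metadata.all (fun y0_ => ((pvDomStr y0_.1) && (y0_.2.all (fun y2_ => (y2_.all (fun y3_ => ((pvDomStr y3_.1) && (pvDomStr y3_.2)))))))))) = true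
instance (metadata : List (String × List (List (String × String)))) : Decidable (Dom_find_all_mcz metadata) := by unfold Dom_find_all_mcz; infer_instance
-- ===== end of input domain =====

-- B precomputes a match mask and the total match count, then one backward scan with a counter
-- emits matching indices of even forward rank directly in descending order; A's toggle flag and
-- its final reverse sort disappear.

-- ===== PORT A =====
def find_all_mcz (metadata : List (String × List (List (String × String)))) : List Int :=
  let gates := ((PySem.Dict.mk metadata).get? "gates").getD []
  let st := (PySem.List.pyRange 0 (gates.length : Int) 1).foldl
    (fun (st : List Int × Bool) i =>
      let name := ((PySem.Dict.mk (PySem.List.pyGetD gates i [])).get? "name").getD ""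
      if name = "MCT" ∨ name = "CNOT" ∨ name = "CCX" then
        if st.2 then (st.1 ++ [i], false) else (st.1, true)
      else st)
    ([], true)
  PySem.List.sorted st.1 (fun x => x) true

-- ===== PORT B =====
def find_all_mcz_alt (metadata : List (String × List (List (String × String)))) : List Int :=
  let wanted : List String := ["MCT", "CNOT", "CCX"]
  let names := (((PySem.Dict.mk metadata).get? "gates").getD []).map
      (fun g => decide ((((PySem.Dict.mk g).get? "name").getD "") ∈ wanted))
  let total : Int := names.foldl (fun acc b => acc + if b then 1 else 0) 0  -- sum(names)
  let st := (PySem.List.pyRange ((names.length : Int) - 1) (-1) (-1)).foldl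
    (fun (st : List Int × Int) i =>
      if PySem.List.pyGetD names i false then
        let seen := st.2 + 1
        (if PySem.Int.mod (total - seen) 2 = 0 then st.1 ++ [i] else st.1, seen)
      else st)
    ([], 0)
  st.1

-- ===== PRECONDITION & SPEC =====
-- Pre_ excludes exactly the inputs where the Python raises KeyError: metadata without a 'gates'
-- key, or a gate dict without a 'name' key.
def Pre_find_all_mcz (metadata : List (String × List (List (String × String)))) : Prop :=
  ((PySem.Dict.mk metadata).get? "gates").isSome = true ∧
  ∀ g ∈ ((PySem.Dict.mk metadata).get? "gates").getD [], ((PySem.Dict.mk g).get? "name").isSome = true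
instance (metadata : List (String × List (List (String × String)))) : Decidable (Pre_find_all_mcz metadata) := by unfold Pre_find_all_mcz; infer_instance
def pvWitness_find_all_mcz : (List (String × List (List (String × String)))) :=
  [("gates", [[("name", "MCT")], [("name", "H")], [("name", "CCX")], [("name", "CNOT")]])]

def Spec_find_all_mcz (metadata : List (String × List (List (String × String)))) (out : List Int) : Prop := out = find_all_mcz_alt metadata
instance (metadata : List (String × List (List (String × String)))) (out : List Int) : Decidable (Spec_find_all_mcz metadata out) := by unfold Spec_find_all_mcz; infer_instance

-- ===== CLAIM (what is proved, stated in full; the proofs are below) =====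
def Claim_equal_find_all_mcz : Prop := ∀ (metadata : List (String × List (List (String × String)))), Dom_find_all_mcz metadata → Pre_find_all_mcz metadata → Spec_find_all_mcz metadata (find_all_mcz metadata)

-- ===== LEMMAS AND PROOFS =====

-- keep the 1st, 3rd, 5th… element (A's toggle, as a function)
def pvPick {α : Type} (b : Bool) : List α → List α
  | [] => []
  | a :: t => if b then a :: pvPick false t else pvPick true t

theorem pvPick_sublist {α : Type} (b : Bool) (xs : List α) : (pvPick b xs).Sublist xs := by
  induction xs generalizing b with
  | nil => simp [pvPick]
  | cons a t ih =>
    cases b <;> simp only [pvPick, Bool.false_eq_true, if_false, if_true]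
    · exact (ih true).cons a
    · exact (ih false).cons₂ a

-- index i of an enumerate pair reads back the pair's element
theorem pvGet_enumerate {α : Type} (d : α) : ∀ (xs pre : List α) (p : Int × α),
    p ∈ PySem.List.enumerate xs (pre.length : Int) → PySem.List.pyGetD (pre ++ xs) p.1 d = p.2 := by
  intro xs
  induction xs with
  | nil => intro pre p hp; simp [PySem.List.enumerate] at hp
  | cons a t ih =>
    intro pre p hp
    rw [PySem.List.enumerate_cons] at hp
    rcases List.mem_cons.mp hp with h | h
    · subst h
      rw [PySem.List.pyGetD_eq_getElem (pre ++ a :: t) d (by positivity) (by simp)]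
      simp
    · have hlen : ((pre.length : Int) + 1) = (((pre ++ [a]).length : Int)) := by simp
      rw [hlen] at h
      have := ih (pre ++ [a]) p h
      simpa using this

-- A's toggle loop, characterised by pvPick over the filtered index list
theorem pvLoop (ps : List (Int × List (String × String))) : ∀ (acc : List Int) (b : Bool),
    (ps.foldl (fun (st : List Int × Bool) p =>
        let name := ((PySem.Dict.mk p.2).get? "name").getD ""
        if name = "MCT" ∨ name = "CNOT" ∨ name = "CCX" then
          if st.2 then (st.1 ++ [p.1], false) else (st.1, true)
        else st) (acc, b)).1
    = acc ++ pvPick b ((ps.filter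
        (fun p => decide ((((PySem.Dict.mk p.2).get? "name").getD "") ∈ (["MCT", "CNOT", "CCX"] : List String)))).map (·.1)) := by
  induction ps with
  | nil => intro acc b; simp [pvPick]
  | cons p t ih =>
    intro acc b
    simp only [List.foldl_cons, List.filter_cons]
    by_cases hc : (((PySem.Dict.mk p.2).get? "name").getD "") = "MCT" ∨
        (((PySem.Dict.mk p.2).get? "name").getD "") = "CNOT" ∨
        (((PySem.Dict.mk p.2).get? "name").getD "") = "CCX"
    · have hm : decide ((((PySem.Dict.mk p.2).get? "name").getD "") ∈ (["MCT", "CNOT", "CCX"] : List String)) = true := by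
        simp [hc]
      cases b <;> simp [hc, ih, pvPick]
    · have hm : decide ((((PySem.Dict.mk p.2).get? "name").getD "") ∈ (["MCT", "CNOT", "CCX"] : List String)) = false := by
        simp only [decide_eq_false_iff_not]
        simpa using hc
      simp [hc, ih]

-- the filtered index list is strictly increasing
theorem pvMatches_pairwise (gates : List (List (String × String))) (q : Int × List (String × String) → Bool) :
    (((PySem.List.enumerate gates 0).filter q).map (·.1)).Pairwise (· < ·) := by
  have hsub : (((PySem.List.enumerate gates 0).filter q).map (·.1)).Sublist
      ((PySem.List.enumerate gates 0).map (·.1)) :=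
    List.filter_sublist.map _
  have hall : ((PySem.List.enumerate gates 0).map (·.1)).Pairwise (· < ·) := by
    rw [PySem.List.map_fst_enumerate]
    exact PySem.List.pairwise_lt_pyRange_one 0 _
  exact hall.sublist hsub

-- sum(names) counts the Trues
theorem pvSum_foldl : ∀ (names : List Bool) (acc : Int),
    names.foldl (fun acc b => acc + if b then 1 else 0) acc = acc + (names.countP id : Nat) := by
  intro names
  induction names with
  | nil => intro acc; simp
  | cons b t ih =>
    intro acc
    cases b <;> simp [List.countP_cons, ih] <;> push_cast <;> ring

-- the match index list has as many elements as the mask has Trues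
theorem pvLen_filter_enumerate : ∀ (xs : List Bool) (s : Int),
    (((PySem.List.enumerate xs s).filter (fun p => p.2)).map (·.1)).length = xs.countP id := by
  intro xs
  induction xs with
  | nil => intro s; simp [PySem.List.enumerate]
  | cons b t ih =>
    intro s
    rw [PySem.List.enumerate_cons]
    cases b <;> simp [List.countP_cons, ih]

-- enumerate commutes with map on the payload
theorem pvEnumerate_map {α β : Type} (f : α → β) : ∀ (xs : List α) (s : Int),
    PySem.List.enumerate (xs.map f) s = (PySem.List.enumerate xs s).map (fun p => (p.1, f p.2)) := by
  intro xs
  induction xs with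
  | nil => intro s; simp [PySem.List.enumerate]
  | cons a t ih =>
    intro s
    simp [PySem.List.enumerate_cons, ih]

-- parity flip of the backward counter
theorem pvFlip (x : Int) (h : PySem.Int.mod (x - 1) 2 = 0) : ¬ PySem.Int.mod x 2 = 0 := by
  rw [PySem.Int.mod_eq_zero_iff_dvd] at h ⊢
  omega

theorem pvFlip' (x : Int) (h : ¬ PySem.Int.mod (x - 1) 2 = 0) : PySem.Int.mod x 2 = 0 := by
  rw [PySem.Int.mod_eq_zero_iff_dvd] at h ⊢
  omega

-- B's backward counting loop, characterised by pvPick (as a foldr on the forward list)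
theorem pvBack (total : Int) : ∀ (ps : List (Int × Bool)),
    ps.foldr (fun p (st : List Int × Int) =>
        if p.2 then
          (if PySem.Int.mod (total - (st.2 + 1)) 2 = 0 then st.1 ++ [p.1] else st.1, st.2 + 1)
        else st) ([], 0)
    = ((pvPick (decide (PySem.Int.mod (total - ((((ps.filter (fun p => p.2)).map (·.1)).length : Nat) : Int)) 2 = 0))
          ((ps.filter (fun p => p.2)).map (·.1))).reverse,
       ((((ps.filter (fun p => p.2)).map (·.1)).length : Nat) : Int)) := by
  intro ps
  induction ps with
  | nil => simp [pvPick]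
  | cons p t ih =>
    rw [List.foldr_cons, ih, List.filter_cons]
    by_cases hp : p.2 = true
    · simp only [hp, if_true, List.map_cons, List.length_cons, Nat.cast_add, Nat.cast_one]
      set ms := (t.filter (fun p => p.2)).map (·.1) with hms
      rw [Prod.mk.injEq]
      refine ⟨?_, rfl⟩
      by_cases hC : PySem.Int.mod (total - ((ms.length : Int) + 1)) 2 = 0
      · rw [if_pos hC]
        have hbt : decide (PySem.Int.mod (total - (ms.length : Int)) 2 = 0) = false := by
          rw [decide_eq_false_iff_not]
          exact pvFlip _ (by rw [show total - (ms.length : Int) - 1 = total - ((ms.length : Int) + 1) by ring]; exact hC)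
        have hbn : decide (PySem.Int.mod (total - ((ms.length : Int) + 1)) 2 = 0) = true :=
          decide_eq_true hC
        rw [hbt, hbn]
        simp [pvPick]
      · rw [if_neg hC]
        have hbt : decide (PySem.Int.mod (total - (ms.length : Int)) 2 = 0) = true := by
          rw [decide_eq_true_eq]
          exact pvFlip' _ (by rw [show total - (ms.length : Int) - 1 = total - ((ms.length : Int) + 1) by ring]; exact hC)
        have hbn : decide (PySem.Int.mod (total - ((ms.length : Int) + 1)) 2 = 0) = false :=
          decide_eq_false hC
        rw [hbt, hbn]
        simp [pvPick]
    · simp only [Bool.not_eq_true] at hp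
      simp [hp]

-- ===== VERDICT (by name: the statement is the Claim_ definition above) =====
theorem find_all_mcz_spec : Claim_equal_find_all_mcz := by
  intro metadata _ _
  unfold Spec_find_all_mcz find_all_mcz find_all_mcz_alt
  set gates := ((PySem.Dict.mk metadata).get? "gates").getD [] with hg
  simp only []
  set pred : List (String × String) → Bool :=
    fun g => decide ((((PySem.Dict.mk g).get? "name").getD "") ∈ (["MCT", "CNOT", "CCX"] : List String)) with hpred
  -- ---- A side: toggle loop = pvPick true over the increasing match index list, then reverse sort
  have henum : PySem.List.pyRange 0 (gates.length : Int) 1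
      = (PySem.List.enumerate gates 0).map (·.1) := by
    rw [PySem.List.map_fst_enumerate]; norm_num
  rw [henum, List.foldl_map]
  rw [PySem.List.foldl_congr_mem _ _ (fun (st : List Int × Bool) p =>
      let name := ((PySem.Dict.mk p.2).get? "name").getD ""
      if name = "MCT" ∨ name = "CNOT" ∨ name = "CCX" then
        if st.2 then (st.1 ++ [p.1], false) else (st.1, true)
      else st) _
    (by
      intro acc p hp
      have := pvGet_enumerate ([] : List (String × String)) gates [] p (by simpa using hp)
      simp only [List.nil_append] at this
      simp [this])]
  rw [pvLoop]
  rw [List.nil_append]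
  set ms := (((PySem.List.enumerate gates 0).filter (fun p => pred p.2)).map (·.1)) with hms
  have hA : PySem.List.sorted (pvPick true ms) (fun x => x) true = (pvPick true ms).reverse := by
    have hpw := pvMatches_pairwise gates (fun p => pred p.2)
    have hpick := hpw.sublist (pvPick_sublist true _)
    exact PySem.List.sorted_rev_eq_of_perm_of_pairwise_gt _ _ _
      (List.reverse_perm _) ((List.pairwise_reverse).mpr hpick)
  rw [hA]
  -- ---- B side
  set names := gates.map pred with hnames
  -- the countdown range is the reversed index list of `names`
  have hrange : PySem.List.pyRange ((names.length : Int) - 1) (-1) (-1)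
      = ((PySem.List.enumerate names 0).map (·.1)).reverse := by
    rw [PySem.List.pyRange_neg_one_eq_reverse, PySem.List.map_fst_enumerate]
    norm_num
  rw [hrange, ← List.map_reverse, List.foldl_map]
  -- replace the indexed lookup by the enumerated payload
  rw [PySem.List.foldl_congr_mem _ _ (fun (st : List Int × Int) p =>
      if p.2 then
        (if PySem.Int.mod ((names.foldl (fun acc b => acc + if b then 1 else 0) 0) - (st.2 + 1)) 2 = 0
         then st.1 ++ [p.1] else st.1, st.2 + 1)
      else st) _
    (by
      intro acc p hp
      rw [List.mem_reverse] at hp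
      have := pvGet_enumerate false names [] p (by simpa using hp)
      simp only [List.nil_append] at this
      simp [this])]
  rw [List.foldl_reverse]
  -- the two match index lists coincide
  have hcomm : ((PySem.List.enumerate names 0).filter (fun p => p.2)).map (·.1) = ms := by
    rw [hnames, pvEnumerate_map, List.filter_map, List.map_map, hms]
    rfl
  have htot : names.foldl (fun acc b => acc + if b then 1 else 0) 0
      = (((((PySem.List.enumerate names 0).filter (fun p => p.2)).map (·.1)).length : Nat) : Int) := by
    rw [pvSum_foldl, pvLen_filter_enumerate]
    simp
  rw [pvBack]
  rw [hcomm, htot, hcomm]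
  have hz : decide (PySem.Int.mod (((ms.length : Nat) : Int) - ((ms.length : Nat) : Int)) 2 = 0) = true := by
    rw [decide_eq_true_eq, PySem.Int.mod_eq_zero_iff_dvd]; omega
  rw [hz]
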